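-- pv_equiv track=rewrite | github.com/Khoshkhah/h3-routing-platform | services/engine-cpp/notebooks/routing_algorithms_sp.py | expand_path_sp
-- ===== SOURCE A (Python) =====
-- from typing import Dict, List, Tuple, Optional, Set
--
-- def expand_path_sp(shortcut_path: List[int], via_lookup: Dict[Tuple[int, int], int]) -> List[int]:
--     """
--     Expand a shortcut path to base edges using the via_lookup table.
--
--     Algorithm:
--     1. For each consecutive pair (u, v) in path, call expand_edge_pair(u, v)
--     2. expand_edge_pair looks up (u, v) in table to get via_edge
--     3. If via_edge == u or via_edge == v or via_edge == 0, return [u, v] (base pair)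
--     4. Otherwise, recursively expand (u, via) and (via, v), combine results
--     """
--     if not shortcut_path:
--         return []
--     if len(shortcut_path) == 1:
--         return [shortcut_path[0]]
--
--     def expand_edge_pair(u: int, v: int, visited: set) -> List[int]:
--         """Expand a single edge pair (u, v) to base edges."""
--         key = (u, v)
--
--         # Cycle detection
--         if key in visited:
--             return [u, v]
--         visited.add(key)
--
--         # Look up via_edge for this pair
--         via = via_lookup.get(key)
--
--         # If no expansion found or via equals u or v or 0, it's a base pair
--         if via is None or via == u or via == v or via == 0:
--             return [u, v]
--
--         # Recursively expand (u, via) and (via, v)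
--         left = expand_edge_pair(u, via, visited)
--         right = expand_edge_pair(via, v, visited)
--
--         # Combine: left ends with junction point, right starts with it
--         # Avoid duplicating the junction
--         if left and right and left[-1] == right[0]:
--             return left + right[1:]
--         else:
--             return left + right
--
--     # Expand each consecutive pair in the path
--     result = []
--     for i in range(len(shortcut_path) - 1):
--         u, v = shortcut_path[i], shortcut_path[i + 1]
--         visited = set()
--         expanded = expand_edge_pair(u, v, visited)
--
--         # Merge with previous result, avoiding duplicate junction
--         if not result:
--             result = expanded
--         elif result and expanded and result[-1] == expanded[0]:
--             result.extend(expanded[1:])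
--         else:
--             result.extend(expanded)
--
--     return result
-- ===== SOURCE B (Python) =====
-- # Iterative re-implementation: an explicit LIFO stack replaces the recursion, and
-- # base-edge vertices are emitted into one shared output list through a
-- # skip-duplicate appender that realises all junction merges at once.
-- from typing import Dict, List, Tuple
--
--
-- def _emit(out: List[int], a: int, b: int) -> None:
--     """Append base pair (a, b), merging the junction with the last vertex."""
--     if out and out[-1] == a:
--         out.append(b)
--     else:
--         out.extend((a, b))
--
--
-- def expand_path_sp(shortcut_path: List[int], via_lookup: Dict[Tuple[int, int], int]) -> List[int]:
--     if not shortcut_path: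
--         return []
--     if len(shortcut_path) == 1:
--         return [shortcut_path[0]]
--     out: List[int] = []
--     for u, v in zip(shortcut_path, shortcut_path[1:]):
--         visited = set()
--         stack = [(u, v)]
--         while stack:
--             a, b = stack.pop()
--             if (a, b) in visited:
--                 _emit(out, a, b)
--                 continue
--             visited.add((a, b))
--             via = via_lookup.get((a, b))
--             if via is None or via == a or via == b or via == 0:
--                 _emit(out, a, b)
--             else:
--                 stack.append((via, b))
--                 stack.append((a, via))
--     return out
-- ===== Notes on version B (the rewrite author's own statement) =====
-- stated objective: alternative
-- what changed: Replaces the recursive expand_edge_pair (which builds and concatenates sublists, merging junctions at every combine step and again in the outer loop) by an explicit LIFO stack of edge pairs that emits base pairs directly into one shared output list through a single skip-duplicate appender.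
import Mathlib
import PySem

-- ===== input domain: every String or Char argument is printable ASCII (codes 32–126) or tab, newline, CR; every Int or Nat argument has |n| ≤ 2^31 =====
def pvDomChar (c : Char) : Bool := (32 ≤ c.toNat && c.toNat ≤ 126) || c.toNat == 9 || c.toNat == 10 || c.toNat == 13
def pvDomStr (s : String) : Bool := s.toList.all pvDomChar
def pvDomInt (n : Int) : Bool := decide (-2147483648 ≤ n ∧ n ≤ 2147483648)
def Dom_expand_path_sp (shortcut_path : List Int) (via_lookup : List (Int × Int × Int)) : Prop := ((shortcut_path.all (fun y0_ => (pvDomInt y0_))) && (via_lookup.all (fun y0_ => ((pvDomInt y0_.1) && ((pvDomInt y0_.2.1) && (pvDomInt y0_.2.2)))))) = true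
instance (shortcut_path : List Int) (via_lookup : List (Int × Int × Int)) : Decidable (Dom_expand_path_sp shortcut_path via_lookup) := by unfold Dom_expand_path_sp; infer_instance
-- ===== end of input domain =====

-- B replaces A's recursive expand_edge_pair by an explicit LIFO stack and a single
-- shared output list with a skip-duplicate appender (objective: alternative
-- decomposition, same cost). Return-value equivalence only (neither mutates its
-- arguments observably).

-- via_lookup.get((a, b)): first entry of the association list whose key is (a, b)
-- (shared dict-lookup helper for both ports).
def pvViaGet (tbl : List (Int × Int × Int)) (a b : Int) : Option Int :=
  match tbl with
  | [] => none
  | (k1, k2, w) :: rest => if k1 = a ∧ k2 = b then some w else pvViaGet rest a b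

-- the keys of via_lookup (termination measure bookkeeping)
def pvViaKeys (tbl : List (Int × Int × Int)) : List (Int × Int) :=
  tbl.map (fun t => (t.1, t.2.1))

-- how many keys of via_lookup are not yet in visited (termination measure)
def pvRemain (tbl : List (Int × Int × Int)) (vis : PySem.Set (Int × Int)) : Nat :=
  ((pvViaKeys tbl).filter (fun k => decide (k ∉ vis))).length

-- termination helper: a successful lookup means the key is a via_lookup key
theorem pvViaGet_mem_keys (tbl : List (Int × Int × Int)) (a b w : Int)
    (h : pvViaGet tbl a b = some w) : (a, b) ∈ pvViaKeys tbl := by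
  induction tbl with
  | nil => simp [pvViaGet] at h
  | cons t rest ih =>
    obtain ⟨k1, k2, v⟩ := t
    by_cases hk : k1 = a ∧ k2 = b
    · simp [pvViaKeys, hk.1, hk.2]
    · rw [pvViaGet, if_neg hk] at h
      simp [pvViaKeys] at ih ⊢
      exact Or.inr (ih h)

-- termination helper: adding to visited never increases the filtered key count
theorem pvFilter_add_le (keys : List (Int × Int)) (vis : PySem.Set (Int × Int)) (k : Int × Int) :
    (keys.filter (fun x => decide (x ∉ vis.add k))).length ≤
      (keys.filter (fun x => decide (x ∉ vis))).length := by
  induction keys with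
  | nil => simp
  | cons x rest ih =>
    simp only [List.filter_cons]
    by_cases hv : x ∈ vis
    · rw [if_neg (by simp [PySem.Set.mem_add, hv]), if_neg (by simp [hv])]
      exact ih
    · by_cases hk : x = k
      · rw [if_neg (by simp [PySem.Set.mem_add, hk]), if_pos (by simp [hv])]
        exact Nat.le_succ_of_le ih
      · rw [if_pos (by simp [PySem.Set.mem_add, hv, hk]), if_pos (by simp [hv])]
        exact Nat.succ_le_succ ih

-- termination helper: adding an unvisited key of the list strictly decreases the count
theorem pvFilter_add_lt (keys : List (Int × Int)) (vis : PySem.Set (Int × Int)) (k : Int × Int)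
    (hk : k ∈ keys) (hnv : k ∉ vis) :
    (keys.filter (fun x => decide (x ∉ vis.add k))).length <
      (keys.filter (fun x => decide (x ∉ vis))).length := by
  induction keys with
  | nil => simp at hk
  | cons x rest ih =>
    simp only [List.filter_cons]
    by_cases hxk : x = k
    · subst hxk
      rw [if_neg (by simp [PySem.Set.mem_add]), if_pos (by simp [hnv])]
      exact Nat.lt_succ_of_le (pvFilter_add_le rest vis x)
    · have hmem : k ∈ rest := by
        rcases List.mem_cons.mp hk with h | h
        · exact absurd h.symm hxk
        · exact h
      by_cases hv : x ∈ vis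
      · rw [if_neg (by simp [PySem.Set.mem_add, hv]), if_neg (by simp [hv])]
        exact ih hmem
      · rw [if_pos (by simp [PySem.Set.mem_add, hv, hxk]), if_pos (by simp [hv])]
        exact Nat.succ_lt_succ (ih hmem)

-- termination helper: adding to visited never increases the measure
theorem pvRemain_add_le (tbl : List (Int × Int × Int)) (vis : PySem.Set (Int × Int))
    (k : Int × Int) : pvRemain tbl (vis.add k) ≤ pvRemain tbl vis :=
  pvFilter_add_le (pvViaKeys tbl) vis k

-- termination helper: adding an unvisited via_lookup key strictly decreases the measure
theorem pvRemain_add_lt (tbl : List (Int × Int × Int)) (vis : PySem.Set (Int × Int))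
    (k : Int × Int) (hk : k ∈ pvViaKeys tbl) (hnv : k ∉ vis) :
    pvRemain tbl (vis.add k) < pvRemain tbl vis :=
  pvFilter_add_lt (pvViaKeys tbl) vis k hk hnv

-- ===== PORT A =====
-- expand_edge_pair(u, v, visited) threading the (shared, mutated) visited set.
-- fuel is a totality guard only: each recursive call inserts a fresh via_lookup
-- key into visited, so the recursion depth is at most via_lookup.length and the
-- fuel via_lookup.length + 1 it is called with is never exhausted.
def pvExpandPair (tbl : List (Int × Int × Int)) :
    Nat → Int → Int → PySem.Set (Int × Int) → List Int × PySem.Set (Int × Int)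
  | 0, u, v, vis => ([u, v], vis)
  | fuel + 1, u, v, vis =>
    if (u, v) ∈ vis then ([u, v], vis)
    else
      let vis1 := vis.add (u, v)
      match pvViaGet tbl u v with
      | none => ([u, v], vis1)
      | some via =>
        if via = u ∨ via = v ∨ via = 0 then ([u, v], vis1)
        else
          let l := pvExpandPair tbl fuel u via vis1
          let r := pvExpandPair tbl fuel via v l.2
          if l.1 ≠ [] ∧ r.1 ≠ [] ∧ l.1.getLast? = r.1.head? then (l.1 ++ r.1.tail, r.2)
          else (l.1 ++ r.1, r.2)

def expand_path_sp (shortcut_path : List Int) (via_lookup : List (Int × Int × Int)) : List Int :=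
  if shortcut_path = [] then []
  else if shortcut_path.length = 1 then [PySem.List.pyGetD shortcut_path 0 0]
  else
    (PySem.List.pyRange 0 ((shortcut_path.length : Int) - 1) 1).foldl
      (fun result i =>
        let u := PySem.List.pyGetD shortcut_path i 0          -- index always in range
        let v := PySem.List.pyGetD shortcut_path (i + 1) 0    -- index always in range
        let expanded := (pvExpandPair via_lookup (via_lookup.length + 1) u v PySem.Set.empty).1
        if result = [] then expanded
        else if result ≠ [] ∧ expanded ≠ [] ∧ result.getLast? = expanded.head? then
          result ++ expanded.tail
        else result ++ expanded) []

-- ===== PORT B =====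
-- _emit(out, a, b): append base pair (a, b), merging the junction with the last vertex
def pvEmit (out : List Int) (a b : Int) : List Int :=
  if out ≠ [] ∧ out.getLast? = some a then out ++ [b] else out ++ [a, b]

-- the while-stack loop of B; terminates because a push consumes an unvisited
-- via_lookup key (pvRemain drops) while every other pop shortens the stack
def pvStackRun (tbl : List (Int × Int × Int)) (stack : List (Int × Int))
    (vis : PySem.Set (Int × Int)) (out : List Int) : List Int :=
  match stack with
  | [] => out
  | (a, b) :: rest =>
    if (a, b) ∈ vis then pvStackRun tbl rest vis (pvEmit out a b)
    else
      let vis1 := vis.add (a, b)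
      match h : pvViaGet tbl a b with
      | none => pvStackRun tbl rest vis1 (pvEmit out a b)
      | some via =>
        if via = a ∨ via = b ∨ via = 0 then pvStackRun tbl rest vis1 (pvEmit out a b)
        else pvStackRun tbl ((a, via) :: (via, b) :: rest) vis1 out
termination_by 3 * pvRemain tbl vis + stack.length
decreasing_by
  · simp only [List.length_cons]; omega
  · have := pvRemain_add_le tbl vis (a, b); simp only [List.length_cons]; omega
  · have := pvRemain_add_le tbl vis (a, b); simp only [List.length_cons]; omega
  · have := pvRemain_add_lt tbl vis (a, b) (pvViaGet_mem_keys tbl a b via h) (by assumption)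
    simp only [List.length_cons]; omega

def expand_path_sp_alt (shortcut_path : List Int) (via_lookup : List (Int × Int × Int)) : List Int :=
  if shortcut_path = [] then []
  else if shortcut_path.length = 1 then [PySem.List.pyGetD shortcut_path 0 0]
  else
    -- zip(shortcut_path, shortcut_path[1:]); shortcut_path[1:] is .tail (PySem.List.slice_from_one)
    (shortcut_path.zip shortcut_path.tail).foldl
      (fun out uv => pvStackRun via_lookup [uv] PySem.Set.empty out) []

-- ===== PRECONDITION & SPEC =====
def Spec_expand_path_sp (shortcut_path : List Int) (via_lookup : List (Int × Int × Int)) (out : List Int) : Prop := out = expand_path_sp_alt shortcut_path via_lookup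
instance (shortcut_path : List Int) (via_lookup : List (Int × Int × Int)) (out : List Int) : Decidable (Spec_expand_path_sp shortcut_path via_lookup out) := by unfold Spec_expand_path_sp; infer_instance

-- ===== CLAIM (what is proved, stated in full; the proofs are below) =====
def Claim_equal_expand_path_sp : Prop := ∀ (shortcut_path : List Int) (via_lookup : List (Int × Int × Int)), Dom_expand_path_sp shortcut_path via_lookup → Spec_expand_path_sp shortcut_path via_lookup (expand_path_sp shortcut_path via_lookup)

-- ===== LEMMAS AND PROOFS =====

-- the junction-merging append both programs perform, as one function
def pvMerge (out l : List Int) : List Int :=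
  if out ≠ [] ∧ l ≠ [] ∧ out.getLast? = l.head? then out ++ l.tail else out ++ l

theorem pvEmit_eq_merge (out : List Int) (a b : Int) :
    pvEmit out a b = pvMerge out [a, b] := by
  simp [pvEmit, pvMerge]

theorem pvGetLast?_append_ne_nil (l m : List Int) (hm : m ≠ []) :
    (l ++ m).getLast? = m.getLast? := by
  rw [List.getLast?_append]
  cases h : m.getLast? with
  | none => exact absurd (List.getLast?_eq_none_iff.mp h) hm
  | some w => rfl

-- A's per-pair result always has ≥ 2 vertices, starts at u and ends at v
theorem pvExpandPair_shape (tbl : List (Int × Int × Int)) :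
    ∀ (fuel : Nat) (u v : Int) (vis : PySem.Set (Int × Int)),
      2 ≤ (pvExpandPair tbl fuel u v vis).1.length ∧
      (pvExpandPair tbl fuel u v vis).1.head? = some u ∧
      (pvExpandPair tbl fuel u v vis).1.getLast? = some v := by
  intro fuel
  induction fuel with
  | zero => intro u v vis; simp [pvExpandPair]
  | succ f ih =>
    intro u v vis
    rw [pvExpandPair]
    by_cases hmem : (u, v) ∈ vis
    · simp [hmem]
    · simp only [if_neg hmem]
      cases hvg : pvViaGet tbl u v with
      | none => simp
      | some via =>
        by_cases hb : via = u ∨ via = v ∨ via = 0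
        · simp [hb]
        · simp only [if_neg hb]
          obtain ⟨hl2, hlh, hll⟩ := ih u via (vis.add (u, v))
          obtain ⟨hr2, hrh, hrl⟩ := ih via v (pvExpandPair tbl f u via (vis.add (u, v))).2
          set l := pvExpandPair tbl f u via (vis.add (u, v)) with hldef
          set r := pvExpandPair tbl f via v l.2 with hrdef
          have hlne : l.1 ≠ [] := by intro h; rw [h] at hl2; simp at hl2
          have hrne : r.1 ≠ [] := by intro h; rw [h] at hr2; simp at hr2
          have hcond : l.1 ≠ [] ∧ r.1 ≠ [] ∧ l.1.getLast? = r.1.head? := by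
            exact ⟨hlne, hrne, by rw [hll, hrh]⟩
          rw [if_pos hcond]
          obtain ⟨a, rest1, hr1a⟩ := List.exists_cons_of_ne_nil hrne
          have hrest1 : rest1 ≠ [] := by
            intro h; rw [hr1a, h] at hr2; simp at hr2
          obtain ⟨b, t, hr1b⟩ := List.exists_cons_of_ne_nil hrest1
          have hr1 : r.1 = a :: b :: t := by rw [hr1a, hr1b]
          refine ⟨?_, ?_, ?_⟩
          · simp only [List.length_append]; omega
          · simp [List.head?_append, hlh]
          · rw [hr1, List.tail_cons, pvGetLast?_append_ne_nil _ _ (by simp)]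
            rw [hr1, List.getLast?_cons_cons] at hrl
            exact hrl

-- expand_edge_pair only adds to visited: the measure never grows through a call
theorem pvExpandPair_mono (tbl : List (Int × Int × Int)) :
    ∀ (fuel : Nat) (u v : Int) (vis : PySem.Set (Int × Int)),
      pvRemain tbl (pvExpandPair tbl fuel u v vis).2 ≤ pvRemain tbl vis := by
  intro fuel
  induction fuel with
  | zero => intro u v vis; simp [pvExpandPair]
  | succ f ih =>
    intro u v vis
    rw [pvExpandPair]
    by_cases hmem : (u, v) ∈ vis
    · simp [hmem]
    · simp only [if_neg hmem]
      cases hvg : pvViaGet tbl u v with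
      | none => simpa using pvRemain_add_le tbl vis (u, v)
      | some via =>
        by_cases hb : via = u ∨ via = v ∨ via = 0
        · simpa [hb] using pvRemain_add_le tbl vis (u, v)
        · simp only [if_neg hb]
          have h1 := ih u via (vis.add (u, v))
          have h2 := ih via v (pvExpandPair tbl f u via (vis.add (u, v))).2
          have h3 := pvRemain_add_le tbl vis (u, v)
          set l := pvExpandPair tbl f u via (vis.add (u, v))
          set r := pvExpandPair tbl f via v l.2
          by_cases hc : l.1 ≠ [] ∧ r.1 ≠ [] ∧ l.1.getLast? = r.1.head?
          · rw [if_pos hc]; exact le_trans h2 (le_trans h1 h3)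
          · rw [if_neg hc]; exact le_trans h2 (le_trans h1 h3)

-- merging is associative once the middle list is a ≥2-vertex chain meeting r
theorem pvMerge_assoc (out l r : List Int) (hl : 2 ≤ l.length) (hrne : r ≠ [])
    (hlr : l.getLast? = r.head?) : pvMerge (pvMerge out l) r = pvMerge out (pvMerge l r) := by
  have hlne : l ≠ [] := by intro h; rw [h] at hl; simp at hl
  obtain ⟨x, rest1, hx1⟩ := List.exists_cons_of_ne_nil hlne
  have hrest1 : rest1 ≠ [] := by intro h; rw [hx1, h] at hl; simp at hl
  obtain ⟨y, lt, hx2⟩ := List.exists_cons_of_ne_nil hrest1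
  obtain rfl : l = x :: y :: lt := by rw [hx1, hx2]
  have hlast : (y :: lt).getLast? = r.head? := by
    rw [← List.getLast?_cons_cons (a := x)]; exact hlr
  have hmlr : pvMerge (x :: y :: lt) r = (x :: y :: lt) ++ r.tail := by
    rw [pvMerge, if_pos ⟨by simp, hrne, hlr⟩]; try rfl
  rw [hmlr]
  by_cases hc : out ≠ [] ∧ out.getLast? = some x
  · have c1 : out ≠ [] ∧ x :: y :: lt ≠ [] ∧ out.getLast? = (x :: y :: lt).head? :=
      ⟨hc.1, by simp, by simp [hc.2]⟩
    have c2 : out ≠ [] ∧ (x :: y :: lt) ++ r.tail ≠ [] ∧ out.getLast? = ((x :: y :: lt) ++ r.tail).head? :=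
      ⟨hc.1, by simp, by simp [hc.2]⟩
    have hin : pvMerge out (x :: y :: lt) = out ++ y :: lt := by
      rw [pvMerge, if_pos c1]; try rfl
    have hgl : (out ++ y :: lt).getLast? = r.head? := by
      rw [pvGetLast?_append_ne_nil _ _ (by simp)]; exact hlast
    have hL : pvMerge (out ++ y :: lt) r = (out ++ y :: lt) ++ r.tail := by
      rw [pvMerge, if_pos ⟨by simp, hrne, hgl⟩]; try rfl
    have hR : pvMerge out ((x :: y :: lt) ++ r.tail) = out ++ (y :: lt ++ r.tail) := by
      rw [pvMerge, if_pos c2]; try rfl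
    rw [hin, hL, hR]; simp
  · have c1 : ¬ (out ≠ [] ∧ x :: y :: lt ≠ [] ∧ out.getLast? = (x :: y :: lt).head?) := by
      simp only [List.head?_cons]; tauto
    have c2 : ¬ (out ≠ [] ∧ (x :: y :: lt) ++ r.tail ≠ [] ∧ out.getLast? = ((x :: y :: lt) ++ r.tail).head?) := by
      simp only [List.cons_append, List.head?_cons]; tauto
    have hin : pvMerge out (x :: y :: lt) = out ++ x :: y :: lt := by
      rw [pvMerge, if_neg c1]; try rfl
    have hgl : (out ++ x :: y :: lt).getLast? = r.head? := by
      rw [pvGetLast?_append_ne_nil _ _ (by simp)]; exact hlr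
    have hL : pvMerge (out ++ x :: y :: lt) r = (out ++ x :: y :: lt) ++ r.tail := by
      rw [pvMerge, if_pos ⟨by simp, hrne, hgl⟩]; try rfl
    have hR : pvMerge out ((x :: y :: lt) ++ r.tail) = out ++ ((x :: y :: lt) ++ r.tail) := by
      rw [pvMerge, if_neg c2]; try rfl
    rw [hin, hL, hR]; simp

-- B's stack loop simulates A's recursion: popping (u, v) performs exactly the
-- merge of A's expand_edge_pair(u, v) result into the output
theorem pvSim (tbl : List (Int × Int × Int)) :
    ∀ (n fuel : Nat) (u v : Int) (vis : PySem.Set (Int × Int)) (stack : List (Int × Int)) (out : List Int),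
      pvRemain tbl vis ≤ n → pvRemain tbl vis < fuel →
      pvStackRun tbl ((u, v) :: stack) vis out =
        pvStackRun tbl stack (pvExpandPair tbl fuel u v vis).2
          (pvMerge out (pvExpandPair tbl fuel u v vis).1) := by
  intro n
  induction n using Nat.strong_induction_on with
  | _ n ih =>
    intro fuel u v vis stack out hn hf
    obtain ⟨f, rfl⟩ : ∃ f, fuel = f + 1 := ⟨fuel - 1, by omega⟩
    rw [pvExpandPair, pvStackRun]
    by_cases hmem : (u, v) ∈ vis
    · simp only [if_pos hmem]
      rw [pvEmit_eq_merge]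
    · simp only [if_neg hmem]
      cases hvg : pvViaGet tbl u v with
      | none => simp only [pvEmit_eq_merge]
      | some via =>
        by_cases hb : via = u ∨ via = v ∨ via = 0
        · simp only [if_pos hb, pvEmit_eq_merge]
        · simp only [if_neg hb]
          have hkey : (u, v) ∈ pvViaKeys tbl := pvViaGet_mem_keys tbl u v via hvg
          have hlt : pvRemain tbl (vis.add (u, v)) < pvRemain tbl vis :=
            pvRemain_add_lt tbl vis (u, v) hkey hmem
          have hml : pvRemain tbl (pvExpandPair tbl f u via (vis.add (u, v))).2 ≤
              pvRemain tbl (vis.add (u, v)) := pvExpandPair_mono tbl f u via (vis.add (u, v))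
          set l := pvExpandPair tbl f u via (vis.add (u, v)) with hldef
          set r := pvExpandPair tbl f via v l.2 with hrdef
          have h1 : pvStackRun tbl ((u, via) :: (via, v) :: stack) (vis.add (u, v)) out =
              pvStackRun tbl ((via, v) :: stack) l.2 (pvMerge out l.1) := by
            exact ih (n - 1) (by omega) f u via (vis.add (u, v)) ((via, v) :: stack) out
              (by omega) (by omega)
          have h2 : pvStackRun tbl ((via, v) :: stack) l.2 (pvMerge out l.1) =
              pvStackRun tbl stack r.2 (pvMerge (pvMerge out l.1) r.1) := by
            exact ih (n - 1) (by omega) f via v l.2 stack (pvMerge out l.1) (by omega) (by omega)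
          rw [h1, h2]
          obtain ⟨hl2, hlh, hll⟩ := pvExpandPair_shape tbl f u via (vis.add (u, v))
          obtain ⟨hr2, hrh, hrl⟩ := pvExpandPair_shape tbl f via v l.2
          have hrne : r.1 ≠ [] := by intro h; rw [h] at hr2; simp at hr2
          have hlne : l.1 ≠ [] := by intro h; rw [h] at hl2; simp at hl2
          have hcond : l.1 ≠ [] ∧ r.1 ≠ [] ∧ l.1.getLast? = r.1.head? := ⟨hlne, hrne, by rw [hll, hrh]⟩
          rw [if_pos hcond]
          have hassoc := pvMerge_assoc out l.1 r.1 hl2 hrne (by rw [hll, hrh])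
          have hm : pvMerge l.1 r.1 = l.1 ++ r.1.tail := by rw [pvMerge, if_pos hcond]
          rw [hassoc, hm]

-- A's per-pair merge step IS pvMerge
theorem pvBody_eq_merge (result e : List Int) :
    (if result = [] then e
     else if result ≠ [] ∧ e ≠ [] ∧ result.getLast? = e.head? then result ++ e.tail
     else result ++ e) = pvMerge result e := by
  by_cases h : result = [] <;> simp [pvMerge, h]

-- the measure starts below via_lookup.length + 1
theorem pvRemain_le_length (tbl : List (Int × Int × Int)) (vis : PySem.Set (Int × Int)) :
    pvRemain tbl vis ≤ tbl.length := by
  unfold pvRemain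
  calc ((pvViaKeys tbl).filter _).length ≤ (pvViaKeys tbl).length := List.length_filter_le _ _
    _ = tbl.length := by simp [pvViaKeys]

theorem pvStackRun_nil (tbl : List (Int × Int × Int)) (vis : PySem.Set (Int × Int))
    (out : List Int) : pvStackRun tbl [] vis out = out := by
  rw [pvStackRun]

-- the index pairs A reads are exactly zip(path, path[1:])
theorem pvPairs_eq (p : List Int) :
    (PySem.List.pyRange 0 ((p.length : Int) - 1) 1).map
      (fun i => (PySem.List.pyGetD p i 0, PySem.List.pyGetD p (i + 1) 0)) = p.zip p.tail := by
  apply List.ext_getElem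
  · simp only [List.length_map, PySem.List.length_pyRange_one, List.length_zip,
      List.length_tail]
    omega
  · intro i h1 h2
    have hi : i < p.length - 1 := by
      simp [PySem.List.length_pyRange_one] at h1; omega
    have hip : i < p.length := by omega
    have hip1 : i + 1 < p.length := by omega
    simp only [List.getElem_map, PySem.List.getElem_pyRange_one, List.getElem_zip]
    have e1 : (0 : Int) + (i : Nat) = ((i : Nat) : Int) := by ring
    rw [e1]
    have e2 : ((i : Int) + 1) = (((i + 1 : Nat)) : Int) := by push_cast; ring
    rw [e2, PySem.List.pyGetD_natCast, PySem.List.pyGetD_natCast]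
    simp [hip, hip1, List.getElem_tail]

-- ===== VERDICT (by name: the statement is the Claim_ definition above) =====
theorem expand_path_sp_spec : Claim_equal_expand_path_sp := by
  intro p tbl _
  unfold Spec_expand_path_sp expand_path_sp expand_path_sp_alt
  split_ifs with h1 h2
  · rfl
  · rfl
  · rw [← pvPairs_eq p, List.foldl_map]
    apply PySem.List.foldl_congr_mem
    intro acc i _
    simp only []
    rw [pvBody_eq_merge]
    rw [pvSim tbl (pvRemain tbl PySem.Set.empty) (tbl.length + 1)
      (PySem.List.pyGetD p i 0) (PySem.List.pyGetD p (i + 1) 0) PySem.Set.empty [] acc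
      (le_refl _) (by have := pvRemain_le_length tbl PySem.Set.empty; omega)]
    rw [pvStackRun_nil]
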